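-- pv_equiv track=rewrite | github.com/jaysooo/Algorithm | problem-solving/baekjoon/Baekjoon3986/main.py | check_good_word
-- ===== SOURCE A (Python) =====
-- def check_good_word(word):
--     stack = []
--     pre_char_idx = -1
--
--     for c in word :
--         if pre_char_idx >=0 and stack[pre_char_idx] == c :
--             stack.pop()
--             pre_char_idx -=1
--         else:
--             stack.append(c)
--             pre_char_idx+=1
--
--     return True if len(stack) == 0 else False
-- ===== SOURCE B (Python) =====
-- def _one_pass(s):
--     out = []
--     i = 0
--     while i < len(s):
--         if i + 1 < len(s) and s[i] == s[i + 1]: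
--             i += 2
--         else:
--             out.append(s[i])
--             i += 1
--     return out
--
-- def check_good_word(word):
--     s = list(word)
--     while True:
--         t = _one_pass(s)
--         if t == s:
--             return len(s) == 0
--         s = t
-- ===== Notes on version B (the rewrite author's own statement) =====
-- stated objective: alternative
-- what changed: Replaces the single left-to-right stack pass by repeated full scans, each deleting every non-overlapping adjacent equal pair, until a scan changes nothing; then tests emptiness.
import Mathlib
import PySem

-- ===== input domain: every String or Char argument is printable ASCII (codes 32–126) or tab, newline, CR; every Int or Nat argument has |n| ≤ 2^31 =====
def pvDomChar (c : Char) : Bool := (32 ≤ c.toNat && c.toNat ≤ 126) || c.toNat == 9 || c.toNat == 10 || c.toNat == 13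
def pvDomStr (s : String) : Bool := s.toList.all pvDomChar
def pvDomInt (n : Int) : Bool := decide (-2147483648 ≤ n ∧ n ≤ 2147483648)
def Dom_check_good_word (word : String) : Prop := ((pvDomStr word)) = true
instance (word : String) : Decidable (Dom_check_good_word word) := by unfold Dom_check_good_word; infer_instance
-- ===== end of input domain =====

-- B replaces A's single stack pass by repeatedly deleting the first adjacent equal pair
-- until none remains (alternative decomposition, not faster).

-- ===== PORT A =====
-- A's loop state: (stack, pre_char_idx); stack.pop() = dropLast, stack[pre_char_idx] via pyGet?.
def check_good_word (word : String) : Bool :=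
  let r := word.toList.foldl (fun (s : List Char × Int) c =>
    if 0 ≤ s.2 ∧ PySem.List.pyGet? s.1 s.2 = some c then (s.1.dropLast, s.2 - 1)
    else (s.1 ++ [c], s.2 + 1)) ([], -1)
  if r.1.length = 0 then true else false

-- ===== PORT B =====
-- Source B's _one_pass: one left-to-right scan deleting non-overlapping adjacent equal pairs
def pvPass : List Char → List Char
  | a :: b :: rest => if a = b then pvPass rest else a :: pvPass (b :: rest)
  | l => l

-- Source B's outer 'while True' loop; a changing pass shortens the list, so length is enough fuel
def pvReduce : Nat → List Char → List Char
  | f + 1, l => if pvPass l = l then l else pvReduce f (pvPass l)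
  | 0, l => l

def check_good_word_alt (word : String) : Bool :=
  (pvReduce word.toList.length word.toList).isEmpty

-- ===== PRECONDITION & SPEC =====
def Spec_check_good_word (word : String) (out : Bool) : Prop := out = check_good_word_alt word
instance (word : String) (out : Bool) : Decidable (Spec_check_good_word word out) := by unfold Spec_check_good_word; infer_instance

-- ===== CLAIM (what is proved, stated in full; the proofs are below) =====
def Claim_equal_check_good_word : Prop := ∀ (word : String), Dom_check_good_word word → Spec_check_good_word word (check_good_word word)

-- ===== LEMMAS AND PROOFS =====

-- canonical head-as-top cancellation stack
def pvStep (t : List Char) (c : Char) : List Char :=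
  match t with
  | x :: ts => if x = c then ts else c :: x :: ts
  | [] => [c]

theorem pvStep_chain {t : List Char} (h : t.IsChain (· ≠ ·)) (c : Char) :
    (pvStep t c).IsChain (· ≠ ·) := by
  match t with
  | [] => exact List.isChain_singleton c
  | x :: ts =>
    by_cases hx : x = c
    · simpa [pvStep, hx] using (List.isChain_cons.mp h).2
    · have hcx : c ≠ x := fun h' => hx h'.symm
      have : (c :: x :: ts).IsChain (· ≠ ·) :=
        List.isChain_cons.mpr ⟨fun y hy => by
          have : y = x := by simpa using hy.symm
          subst this; exact hcx, h⟩
      simpa [pvStep, hx] using this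

theorem pvStep_step {t : List Char} (h : t.IsChain (· ≠ ·)) (a : Char) :
    pvStep (pvStep t a) a = t := by
  match t with
  | [] => simp [pvStep]
  | x :: ts =>
    by_cases hx : x = a
    · subst hx
      match ts with
      | [] => simp [pvStep]
      | y :: ts' =>
        have hy : x ≠ y := (List.isChain_cons.mp h).1 y rfl
        simp [pvStep, Ne.symm hy]
    · have hax : ¬ a = x := fun h' => hx h'.symm
      simp [pvStep, hx]

theorem pvPass_eq_of_not_pair {l : List Char}
    (h1 : ∀ (a b : Char) (rest : List Char), l = a :: b :: rest → False) :
    pvPass l = l := by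
  match l, h1 with
  | [], _ => rfl
  | [a], _ => rfl
  | a :: b :: rest, h1 => exact absurd rfl (h1 a b rest)

theorem pvPass_cons_self (b : Char) (rest : List Char) :
    pvPass (b :: b :: rest) = pvPass rest := by simp [pvPass]

theorem pvPass_foldl (l : List Char) :
    ∀ t : List Char, t.IsChain (· ≠ ·) → (pvPass l).foldl pvStep t = l.foldl pvStep t := by
  induction l using pvPass.induct with
  | case1 b rest ih =>
    intro t h
    rw [pvPass_cons_self, ih t h]
    simp only [List.foldl]
    rw [pvStep_step h b]
  | case2 a b rest hab ih =>
    intro t h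
    simp only [pvPass, if_neg hab, List.foldl]
    exact ih (pvStep t a) (pvStep_chain h a)
  | case3 l h1 => intro t _; rw [pvPass_eq_of_not_pair h1]

theorem pvPass_length (l : List Char) : (pvPass l).length ≤ l.length := by
  induction l using pvPass.induct with
  | case1 b rest ih =>
    rw [pvPass_cons_self]
    simp only [List.length_cons]; omega
  | case2 a b rest hab ih =>
    simp only [pvPass, if_neg hab, List.length_cons] at ih ⊢; omega
  | case3 l h1 => rw [pvPass_eq_of_not_pair h1]

theorem pvPass_lt {l : List Char} (h : pvPass l ≠ l) : (pvPass l).length < l.length := by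
  induction l using pvPass.induct with
  | case1 b rest ih =>
    rw [pvPass_cons_self]
    have := pvPass_length rest
    simp only [List.length_cons]; omega
  | case2 a b rest hab ih =>
    simp only [pvPass, if_neg hab] at h ⊢
    have hne : pvPass (b :: rest) ≠ b :: rest := fun he => h (by rw [he])
    have := ih hne
    simp only [List.length_cons] at this ⊢; omega
  | case3 l h1 => exact absurd (pvPass_eq_of_not_pair h1) h

theorem pvPass_fix_chain {l : List Char} (h : pvPass l = l) : l.IsChain (· ≠ ·) := by
  induction l using pvPass.induct with
  | case1 b rest ih =>
    rw [pvPass_cons_self] at h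
    have h1 := pvPass_length rest
    have : (pvPass rest).length = rest.length + 2 := by rw [h]; simp
    omega
  | case2 a b rest hab ih =>
    rw [pvPass, if_neg hab] at h
    have h2 : pvPass (b :: rest) = b :: rest := by injection h
    exact List.isChain_cons.mpr ⟨fun y hy => by
      have : y = b := by simpa using hy.symm
      subst this; exact hab, ih h2⟩
  | case3 l h1 =>
    match l, h1 with
    | [], _ => exact List.isChain_nil
    | [a], _ => exact List.isChain_singleton a
    | a :: b :: rest, h1 => exact absurd rfl (h1 a b rest)

theorem pvReduce_fix {f : Nat} {l : List Char} (hf : l.length ≤ f) :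
    pvPass (pvReduce f l) = pvReduce f l := by
  induction f generalizing l with
  | zero =>
    have : l = [] := List.eq_nil_of_length_eq_zero (by omega)
    subst this; rfl
  | succ f ih =>
    by_cases hp : pvPass l = l
    · simp [pvReduce, hp]
    · have := pvPass_lt hp
      simpa [pvReduce, hp] using ih (l := pvPass l) (by omega)

theorem pvReduce_foldl (f : Nat) (l : List Char) :
    (pvReduce f l).foldl pvStep [] = l.foldl pvStep [] := by
  induction f generalizing l with
  | zero => simp [pvReduce]
  | succ f ih =>
    by_cases hp : pvPass l = l
    · simp [pvReduce, hp]
    · simp only [pvReduce, if_neg hp]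
      rw [ih, pvPass_foldl _ [] List.isChain_nil]

theorem pvChain_foldl {l : List Char} (h : l.IsChain (· ≠ ·)) :
    ∀ t : List Char, (∀ a b, t.head? = some a → l.head? = some b → a ≠ b) →
      l.foldl pvStep t = l.reverse ++ t := by
  induction l with
  | nil => intro t _; simp
  | cons a l ih =>
    intro t ht
    have hstep : pvStep t a = a :: t := by
      match t with
      | [] => simp [pvStep]
      | x :: ts =>
        have : x ≠ a := ht x a rfl rfl
        simp [pvStep, this]
    simp only [List.foldl, hstep]
    rw [ih (List.isChain_cons.mp h).2 (a :: t) ?_]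
    · simp
    · intro x b hx hb
      have hxa : x = a := by simpa using hx.symm
      subst hxa
      cases l with
      | nil => simp at hb
      | cons c l' =>
        have hcb : c = b := by simpa using hb
        subst hcb
        exact (List.isChain_cons.mp h).1 _ rfl

-- A's loop state tracks (reversed canonical stack, its length - 1)
theorem pvA_foldl (l : List Char) : ∀ t : List Char,
    l.foldl (fun (s : List Char × Int) c =>
      if 0 ≤ s.2 ∧ PySem.List.pyGet? s.1 s.2 = some c then (s.1.dropLast, s.2 - 1)
      else (s.1 ++ [c], s.2 + 1)) (t.reverse, (t.length : Int) - 1)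
    = ((l.foldl pvStep t).reverse, ((l.foldl pvStep t).length : Int) - 1) := by
  induction l with
  | nil => intro t; simp
  | cons a l ih =>
    intro t
    have hstate : (if 0 ≤ (t.length : Int) - 1 ∧
          PySem.List.pyGet? t.reverse ((t.length : Int) - 1) = some a
        then (t.reverse.dropLast, (t.length : Int) - 1 - 1)
        else (t.reverse ++ [a], (t.length : Int) - 1 + 1))
        = ((pvStep t a).reverse, ((pvStep t a).length : Int) - 1) := by
      match t with
      | [] => simp [pvStep]
      | x :: ts =>
        have hget : PySem.List.pyGet? (x :: ts).reverse (((x :: ts).length : Int) - 1)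
            = some x := by
          have h1 : (((x :: ts).length : Int) - 1) = ((ts.length : Nat) : Int) := by
            push_cast [List.length_cons]; ring
          rw [h1, PySem.List.pyGet?_natCast]
          simp
        by_cases hx : x = a
        · subst hx
          rw [if_pos ⟨by simp, hget⟩]
          simp only [pvStep, if_true, List.reverse_cons, List.dropLast_concat,
            List.length_cons, Prod.mk.injEq]
          exact ⟨trivial, by push_cast; ring⟩
        · rw [if_neg ?_]
          · simp only [pvStep, if_neg hx, List.reverse_cons, List.length_cons,
              Prod.mk.injEq]
            exact ⟨by simp, by push_cast; ring⟩
          · rintro ⟨-, hc⟩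
            rw [hget] at hc
            exact hx (by simpa using hc)
    simp only [List.foldl, hstate, ih]

-- ===== VERDICT (by name: the statement is the Claim_ definition above) =====
theorem check_good_word_spec : Claim_equal_check_good_word := by
  intro word _
  unfold Spec_check_good_word check_good_word check_good_word_alt
  set l := word.toList with hl
  have hA := pvA_foldl l []
  simp only [List.reverse_nil, List.length_nil, Nat.cast_zero, zero_sub] at hA
  set r := pvReduce l.length l with hr
  have hfix : pvPass r = r := pvReduce_fix (le_refl _)
  have hchain := pvPass_fix_chain hfix
  have hfold : r.foldl pvStep [] = l.foldl pvStep [] := pvReduce_foldl l.length l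
  have hrrev : l.foldl pvStep [] = r.reverse := by
    rw [← hfold]
    simpa using pvChain_foldl hchain [] (by simp)
  simp only [hA, hrrev, List.reverse_reverse]
  cases r <;> simp
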